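-- pv_equiv track=rewrite | github.com/jnth/pygonize | pygonize/pygonize.py | limits
-- ===== SOURCE A (Python) =====
-- def limits(x, l):
--     """Get limits of a value 'x' inside a list 'l'.
--
--     :param x: value.
--     :param l: list of values.
--     :return: (min, max) or None
--     """
--     l = sorted(l)
--     if x < min(l):
--         return None  # outside the list
--     if x > max(l):
--         return None  # outside the list
--     if x in l:
--         return x, x  # exact value
--     mn = max([i for (i, j) in zip(l, [x]*len(l)) if j > i])
--     mx = min([i for (i, j) in zip(l, [x]*len(l)) if j < i])
--     return mn, mx
-- ===== SOURCE B (Python) =====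
-- def limits(x, l):
--     """Get limits of a value 'x' inside a list 'l' in one linear scan (no sorting)."""
--     exact = False
--     below = None  # largest element strictly below x seen so far
--     above = None  # smallest element strictly above x seen so far
--     for v in l:
--         if v == x:
--             exact = True
--         elif v < x:
--             if below is None or below < v:
--                 below = v
--         else:
--             if above is None or v < above:
--                 above = v
--     if exact:
--         return x, x
--     if below is None or above is None:
--         return None  # x is outside the range of l
--     return below, above
-- ===== Notes on version B (the rewrite author's own statement) =====
-- stated objective: faster
-- what changed: Replaced sort + min/max + two zip-based comprehensions with a single linear scan maintaining the exact flag, the largest element below x and the smallest above x.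
import Mathlib
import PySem

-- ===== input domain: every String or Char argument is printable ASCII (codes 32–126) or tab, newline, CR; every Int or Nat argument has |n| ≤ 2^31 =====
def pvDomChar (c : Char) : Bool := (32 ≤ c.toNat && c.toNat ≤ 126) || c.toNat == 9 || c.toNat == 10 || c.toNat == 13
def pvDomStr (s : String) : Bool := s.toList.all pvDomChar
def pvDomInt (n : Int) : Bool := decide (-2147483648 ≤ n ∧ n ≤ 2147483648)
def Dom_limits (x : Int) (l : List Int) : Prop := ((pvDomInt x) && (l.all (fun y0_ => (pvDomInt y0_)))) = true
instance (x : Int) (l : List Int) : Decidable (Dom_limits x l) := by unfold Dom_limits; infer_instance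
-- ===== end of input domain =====

-- B replaces sort + min/max + two zip comprehensions by one linear scan (exact flag, best-below, best-above); measured faster.


-- ===== PORT A =====
def limits (x : Int) (l : List Int) : Option (List Int) :=
  -- l = sorted(l)
  let ls := PySem.List.sorted l (fun y => y) false
  -- min(l), max(l): raise on the empty list (excluded by Pre_)
  match PySem.List.min? ls (fun y => y), PySem.List.max? ls (fun y => y) with
  | some mn0, some mx0 =>
    if x < mn0 then none
    else if mx0 < x then none
    else if x ∈ ls then some [x, x]
    else
      -- [i for (i, j) in zip(l, [x]*len(l)) if j > i]  and  … if j < i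
      let lows := (ls.zip (List.replicate ls.length x)).filterMap
        (fun p => if p.1 < p.2 then some p.1 else none)
      let highs := (ls.zip (List.replicate ls.length x)).filterMap
        (fun p => if p.2 < p.1 then some p.1 else none)
      match PySem.List.max? lows (fun y => y), PySem.List.min? highs (fun y => y) with
      | some mn, some mx => some [mn, mx]
      | _, _ => none  -- Python would raise here (max/min of empty); unreachable after the branches above
  | _, _ => none  -- Python raises ValueError (empty list); excluded by Pre_

-- ===== PORT B =====
-- state: (exact, below, above)
def scanStep (x : Int) (s : Bool × Option Int × Option Int) (v : Int) :
    Bool × Option Int × Option Int :=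
  if v = x then (true, s.2.1, s.2.2)
  else if v < x then
    (s.1,
     some (match s.2.1 with | none => v | some b => if b < v then v else b),
     s.2.2)
  else
    (s.1, s.2.1,
     some (match s.2.2 with | none => v | some a => if v < a then v else a))

def limits_alt (x : Int) (l : List Int) : Option (List Int) :=
  let st := l.foldl (scanStep x) (false, none, none)
  if st.1 then some [x, x]
  else
    match st.2.1 with
    | none => none
    | some b =>
      match st.2.2 with
      | none => none
      | some a => some [b, a]

-- ===== PRECONDITION & SPEC =====
-- Python A raises ValueError on the empty list (min([])); that is the only input it raises on.
def Pre_limits (x : Int) (l : List Int) : Prop := l ≠ []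
instance (x : Int) (l : List Int) : Decidable (Pre_limits x l) := by unfold Pre_limits; infer_instance
def pvWitness_limits : Int × List Int := (2, [1, 3, 5])

def Spec_limits (x : Int) (l : List Int) (out : Option (List Int)) : Prop := out = limits_alt x l
instance (x : Int) (l : List Int) (out : Option (List Int)) : Decidable (Spec_limits x l out) := by unfold Spec_limits; infer_instance

-- ===== CLAIM (what is proved, stated in full; the proofs are below) =====
def Claim_equal_limits : Prop := ∀ (x : Int) (l : List Int), Dom_limits x l → Pre_limits x l → Spec_limits x l (limits x l)

-- ===== LEMMAS AND PROOFS =====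

-- max?/min? with the identity key depend only on the multiset of elements
theorem max?_id_perm {xs ys : List Int} (h : xs.Perm ys) :
    PySem.List.max? xs (fun y => y) = PySem.List.max? ys (fun y => y) := by
  cases h1 : PySem.List.max? xs (fun y => y) with
  | none =>
    have hx : xs = [] := (PySem.List.max?_eq_none_iff xs _).mp h1
    subst hx
    have hy : ys = [] := h.symm.eq_nil
    subst hy
    exact ((PySem.List.max?_eq_none_iff [] _).mpr rfl).symm
  | some m =>
    cases h2 : PySem.List.max? ys (fun y => y) with
    | none =>
      have hy : ys = [] := (PySem.List.max?_eq_none_iff ys _).mp h2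
      subst hy
      have hx : xs = [] := h.eq_nil
      rw [hx, (PySem.List.max?_eq_none_iff ([] : List Int) (fun y => y)).mpr rfl] at h1
      cases h1
    | some m' =>
      have hm : m ∈ xs := PySem.List.max?_mem h1
      have hm' : m' ∈ ys := PySem.List.max?_mem h2
      have : m = m' :=
        le_antisymm (PySem.List.max?_isMax h2 m (h.mem_iff.mp hm))
          (PySem.List.max?_isMax h1 m' (h.mem_iff.mpr hm'))
      rw [this]

theorem min?_id_perm {xs ys : List Int} (h : xs.Perm ys) :
    PySem.List.min? xs (fun y => y) = PySem.List.min? ys (fun y => y) := by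
  cases h1 : PySem.List.min? xs (fun y => y) with
  | none =>
    have hx : xs = [] := (PySem.List.min?_eq_none_iff xs _).mp h1
    subst hx
    have hy : ys = [] := h.symm.eq_nil
    subst hy
    exact ((PySem.List.min?_eq_none_iff [] _).mpr rfl).symm
  | some m =>
    cases h2 : PySem.List.min? ys (fun y => y) with
    | none =>
      have hy : ys = [] := (PySem.List.min?_eq_none_iff ys _).mp h2
      subst hy
      have hx : xs = [] := h.eq_nil
      rw [hx, (PySem.List.min?_eq_none_iff ([] : List Int) (fun y => y)).mpr rfl] at h1
      cases h1
    | some m' =>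
      have hm : m ∈ xs := PySem.List.min?_mem h1
      have hm' : m' ∈ ys := PySem.List.min?_mem h2
      have : m = m' :=
        le_antisymm (PySem.List.min?_isMin h1 m' (h.mem_iff.mpr hm'))
          (PySem.List.min?_isMin h2 m (h.mem_iff.mp hm))
      rw [this]

-- the zip-with-replicate comprehensions are plain filters
theorem zip_replicate_filterMap_lt (x : Int) (xs : List Int) :
    (xs.zip (List.replicate xs.length x)).filterMap
        (fun p => if p.1 < p.2 then some p.1 else none)
      = xs.filter (fun v => decide (v < x)) := by
  induction xs with
  | nil => rfl
  | cons v t ih =>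
    by_cases hv : v < x <;>
      simp [List.replicate_succ, hv, ih]

theorem zip_replicate_filterMap_gt (x : Int) (xs : List Int) :
    (xs.zip (List.replicate xs.length x)).filterMap
        (fun p => if p.2 < p.1 then some p.1 else none)
      = xs.filter (fun v => decide (x < v)) := by
  induction xs with
  | nil => rfl
  | cons v t ih =>
    by_cases hv : x < v <;>
      simp [List.replicate_succ, hv, ih]

-- B's fold invariant
theorem scanStep_fold (x : Int) (l : List Int) (e : Bool) (b a : Option Int) :
    l.foldl (scanStep x) (e, b, a) =
      (e || l.contains x,
       (l.filter (fun v => decide (v < x))).foldl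
         (fun acc v => some (match acc with | none => v | some b => if b < v then v else b)) b,
       (l.filter (fun v => decide (x < v))).foldl
         (fun acc v => some (match acc with | none => v | some a => if v < a then v else a)) a) := by
  induction l generalizing e b a with
  | nil => simp
  | cons v t ih =>
    by_cases h1 : v = x
    · subst h1
      simp [List.foldl_cons, scanStep, ih]
    · by_cases h2 : v < x
      · have h3 : ¬ x < v := by omega
        simp [List.foldl_cons, scanStep, h1, h2, h3, ih, Ne.symm h1]
      · have h3 : x < v := by omega
        simp [List.foldl_cons, scanStep, h1, h2, h3, ih, Ne.symm h1]

theorem fold_max_some (t : List Int) (b : Int) :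
    t.foldl (fun acc v => some (match acc with | none => v | some b => if b < v then v else b))
        (some b)
      = some (t.foldl max b) := by
  induction t generalizing b with
  | nil => rfl
  | cons u t ih =>
    have h : (if b < u then u else b) = max b u := by
      rw [max_def]; split_ifs <;> omega
    simp only [List.foldl_cons, ih, h]

theorem fold_min_some (t : List Int) (b : Int) :
    t.foldl (fun acc v => some (match acc with | none => v | some a => if v < a then v else a))
        (some b)
      = some (t.foldl min b) := by
  induction t generalizing b with
  | nil => rfl
  | cons u t ih =>
    have h : (if u < b then u else b) = min b u := by
      rw [min_def]; split_ifs <;> omega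
    simp only [List.foldl_cons, ih, h]

theorem fold_max_none (t : List Int) :
    t.foldl (fun acc v => some (match acc with | none => v | some b => if b < v then v else b))
        (none : Option Int)
      = PySem.List.max? t (fun y => y) := by
  cases t with
  | nil => exact ((PySem.List.max?_eq_none_iff [] _).mpr rfl).symm
  | cons v t => simp only [List.foldl_cons, fold_max_some, PySem.List.max?_id_cons]

theorem fold_min_none (t : List Int) :
    t.foldl (fun acc v => some (match acc with | none => v | some a => if v < a then v else a))
        (none : Option Int)
      = PySem.List.min? t (fun y => y) := by
  cases t with
  | nil => exact ((PySem.List.min?_eq_none_iff [] _).mpr rfl).symm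
  | cons v t => simp only [List.foldl_cons, fold_min_some, PySem.List.min?_id_cons]

-- ===== VERDICT (by name: the statement is the Claim_ definition above) =====
theorem limits_spec : Claim_equal_limits := by
  intro x l _ hpre
  unfold Spec_limits
  have hB : limits_alt x l =
      (if l.contains x then some [x, x]
       else
         match PySem.List.max? (l.filter (fun v => decide (v < x))) (fun y => y) with
         | none => none
         | some b =>
           match PySem.List.min? (l.filter (fun v => decide (x < v))) (fun y => y) with
           | none => none
           | some a => some [b, a]) := by
    simp only [limits_alt, scanStep_fold, fold_max_none, fold_min_none, Bool.false_or]
  rw [hB]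
  have hperm := PySem.List.sorted_perm l (fun y => y) false
  have hlsne : PySem.List.sorted l (fun y => y) false ≠ [] := by
    simpa [PySem.List.sorted_eq_nil_iff] using hpre
  obtain ⟨mn0, hmn0⟩ : ∃ m, PySem.List.min? (PySem.List.sorted l (fun y => y) false) (fun y => y) = some m := by
    cases h : PySem.List.min? (PySem.List.sorted l (fun y => y) false) (fun y => y) with
    | none => exact absurd ((PySem.List.min?_eq_none_iff _ _).mp h) hlsne
    | some m => exact ⟨m, rfl⟩
  obtain ⟨mx0, hmx0⟩ : ∃ m, PySem.List.max? (PySem.List.sorted l (fun y => y) false) (fun y => y) = some m := by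
    cases h : PySem.List.max? (PySem.List.sorted l (fun y => y) false) (fun y => y) with
    | none => exact absurd ((PySem.List.max?_eq_none_iff _ _).mp h) hlsne
    | some m => exact ⟨m, rfl⟩
  have hmn0mem : mn0 ∈ l := hperm.mem_iff.mp (PySem.List.min?_mem hmn0)
  have hmx0mem : mx0 ∈ l := hperm.mem_iff.mp (PySem.List.max?_mem hmx0)
  have hmn0min : ∀ y ∈ l, mn0 ≤ y := fun y hy => PySem.List.min?_isMin hmn0 y (hperm.mem_iff.mpr hy)
  have hmx0max : ∀ y ∈ l, y ≤ mx0 := fun y hy => PySem.List.max?_isMax hmx0 y (hperm.mem_iff.mpr hy)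
  simp only [limits, hmn0, hmx0]
  rw [zip_replicate_filterMap_lt, zip_replicate_filterMap_gt,
    max?_id_perm (hperm.filter (fun v => decide (v < x))),
    min?_id_perm (hperm.filter (fun v => decide (x < v)))]
  by_cases hx : x ∈ l
  · have hc : l.contains x = true := by simpa using hx
    have h1 : ¬ x < mn0 := not_lt.mpr (hmn0min x hx)
    have h2 : ¬ mx0 < x := not_lt.mpr (hmx0max x hx)
    have h3 : x ∈ PySem.List.sorted l (fun y => y) false := hperm.mem_iff.mpr hx
    simp [h1, h2, h3, hx]
  · have hc : l.contains x = false := by simpa using hx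
    have hxls : x ∉ PySem.List.sorted l (fun y => y) false := fun h => hx (hperm.mem_iff.mp h)
    cases h1 : PySem.List.max? (l.filter (fun v => decide (v < x))) (fun y => y) with
    | none =>
      have hfe : l.filter (fun v => decide (v < x)) = [] := (PySem.List.max?_eq_none_iff _ _).mp h1
      have hall : ∀ v ∈ l, ¬ v < x := by
        intro v hv hlt
        have hm : v ∈ l.filter (fun v => decide (v < x)) := List.mem_filter.mpr ⟨hv, by simpa⟩
        rw [hfe] at hm; cases hm
      have hxmn : x < mn0 := by
        have h4 := hall mn0 hmn0mem
        have h5 : mn0 ≠ x := fun h => hx (h ▸ hmn0mem)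
        omega
      simp [hxmn, hx]
    | some b =>
      have hb := List.mem_filter.mp (PySem.List.max?_mem h1)
      have hbl : b ∈ l := hb.1
      have hblt : b < x := by simpa using hb.2
      have h3 : ¬ x < mn0 := by have := hmn0min b hbl; omega
      cases h2 : PySem.List.min? (l.filter (fun v => decide (x < v))) (fun y => y) with
      | none =>
        have hfe : l.filter (fun v => decide (x < v)) = [] := (PySem.List.min?_eq_none_iff _ _).mp h2
        have hall : ∀ v ∈ l, ¬ x < v := by
          intro v hv hlt
          have hm : v ∈ l.filter (fun v => decide (x < v)) := List.mem_filter.mpr ⟨hv, by simpa⟩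
          rw [hfe] at hm; cases hm
        have hmxx : mx0 < x := by
          have h4 := hall mx0 hmx0mem
          have h5 : mx0 ≠ x := fun h => hx (h ▸ hmx0mem)
          omega
        simp [h3, hmxx, hx]
      | some a =>
        have ha := List.mem_filter.mp (PySem.List.min?_mem h2)
        have hal : a ∈ l := ha.1
        have halt : x < a := by simpa using ha.2
        have h4 : ¬ mx0 < x := by have := hmx0max a hal; omega
        simp [h3, h4, hxls, hx]
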